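-- pv_equiv track=rewrite | github.com/magus-warrior/simple-namecheap-ddns | agent/core.py | _format_namecheap_message
-- ===== SOURCE A (Python) =====
-- from typing import Optional
--
-- def _format_namecheap_message(
--     body: str,
--     response_code: Optional[int],
--     fields: dict[str, str],
-- ) -> str:
--     detail_parts: list[str] = []
--     if response_code is not None:
--         detail_parts.append(f"HTTP {response_code}")
--     if fields:
--         ordered_fields: list[str] = []
--         for key in ("ErrCount", "IsSuccess", "Err1"):
--             if key in fields:
--                 ordered_fields.append(f"{key}={fields[key]}")
--         for key, value in fields.items():
--             if key in {"ErrCount", "IsSuccess", "Err1"}: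
--                 continue
--             ordered_fields.append(f"{key}={value}")
--         detail_parts.extend(ordered_fields)
--     base = body.strip()
--     if detail_parts:
--         detail = " | ".join(detail_parts)
--         if base:
--             return f"{base} ({detail})"
--         return detail
--     return base
-- ===== SOURCE B (Python) =====
-- def _format_namecheap_message(body, response_code, fields):
--     prio = {"ErrCount": 0, "IsSuccess": 1, "Err1": 2}
--     detail_parts = []
--     if response_code is not None:
--         detail_parts.append(f"HTTP {response_code}")
--     if fields:
--         detail_parts += [
--             f"{k}={v}"
--             for k, v in sorted(fields.items(), key=lambda kv: prio.get(kv[0], 3))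
--         ]
--     base = body.strip()
--     if detail_parts:
--         detail = " | ".join(detail_parts)
--         return f"{base} ({detail})" if base else detail
--     return base
-- ===== Notes on version B (the rewrite author's own statement) =====
-- stated objective: simpler
-- what changed: Replaces the two explicit passes over the fields (a scan for the three priority keys followed by a scan over the remaining items) with a single stable sort keyed by a priority-rank table, then one comprehension.
import Mathlib
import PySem

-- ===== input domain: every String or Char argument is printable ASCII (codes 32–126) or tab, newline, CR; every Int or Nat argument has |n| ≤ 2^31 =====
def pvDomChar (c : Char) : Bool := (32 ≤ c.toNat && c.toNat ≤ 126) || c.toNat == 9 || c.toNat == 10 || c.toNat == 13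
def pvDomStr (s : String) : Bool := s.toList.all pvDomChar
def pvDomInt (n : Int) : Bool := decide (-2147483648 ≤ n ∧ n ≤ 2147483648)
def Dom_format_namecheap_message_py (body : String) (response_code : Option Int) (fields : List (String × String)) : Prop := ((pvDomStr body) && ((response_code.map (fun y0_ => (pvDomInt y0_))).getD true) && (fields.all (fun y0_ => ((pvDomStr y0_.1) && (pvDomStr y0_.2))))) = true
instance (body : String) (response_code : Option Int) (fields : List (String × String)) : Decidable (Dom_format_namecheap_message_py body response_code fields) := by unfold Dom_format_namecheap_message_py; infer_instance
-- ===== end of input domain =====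

-- B replaces A's two explicit passes over the fields (priority-key scan, then the rest) by one
-- stable sort under a priority-rank table; same result, simpler single-pass assembly.


-- ===== PORT A =====
def format_namecheap_message_py (body : String) (response_code : Option Int) (fields : List (String × String)) : String :=
  let detail_parts : List String :=
    match response_code with
    | some n => ["HTTP " ++ PySem.Int.toStr n]
    | none => []
  let detail_parts :=
    if fields = [] then detail_parts
    else
      -- for key in ("ErrCount", "IsSuccess", "Err1"): if key in fields: append f"{key}={fields[key]}"
      let ordered_fields : List String :=
        (["ErrCount", "IsSuccess", "Err1"] : List String).foldl (fun acc key =>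
          match (PySem.Dict.mk fields).get? key with
          | some v => acc ++ [key ++ "=" ++ v]
          | none => acc) []
      -- for key, value in fields.items(): skip the priority keys, append the rest
      let ordered_fields := fields.foldl (fun acc kv =>
        if kv.1 == "ErrCount" || kv.1 == "IsSuccess" || kv.1 == "Err1" then acc
        else acc ++ [kv.1 ++ "=" ++ kv.2]) ordered_fields
      detail_parts ++ ordered_fields
  let base := PySem.Str.strip body
  if detail_parts ≠ [] then
    let detail := PySem.Str.join " | " detail_parts
    if base ≠ "" then base ++ " (" ++ detail ++ ")" else detail
  else base

-- ===== PORT B =====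
-- prio = {"ErrCount": 0, "IsSuccess": 1, "Err1": 2}
def pvPrio : PySem.Dict String Int :=
  PySem.Dict.mk [("ErrCount", 0), ("IsSuccess", 1), ("Err1", 2)]

def format_namecheap_message_py_alt (body : String) (response_code : Option Int) (fields : List (String × String)) : String :=
  let detail_parts : List String :=
    match response_code with
    | some n => ["HTTP " ++ PySem.Int.toStr n]
    | none => []
  let detail_parts :=
    if fields = [] then detail_parts
    else
      detail_parts ++
        (PySem.List.sorted fields (fun kv => pvPrio.getD kv.1 3) false).map
          (fun kv => kv.1 ++ "=" ++ kv.2)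
  let base := PySem.Str.strip body
  if detail_parts ≠ [] then
    let detail := PySem.Str.join " | " detail_parts
    if base ≠ "" then base ++ " (" ++ detail ++ ")" else detail
  else base

-- ===== PRECONDITION & SPEC =====
-- Pre_ excludes lists whose keys repeat: a Python dict argument cannot carry duplicate keys, so
-- such association lists do not correspond to any call of the Python function.
def Pre_format_namecheap_message_py (body : String) (response_code : Option Int) (fields : List (String × String)) : Prop :=
  (fields.map Prod.fst).Nodup
instance (body : String) (response_code : Option Int) (fields : List (String × String)) : Decidable (Pre_format_namecheap_message_py body response_code fields) := by unfold Pre_format_namecheap_message_py; infer_instance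

def pvWitness_format_namecheap_message_py : String × Option Int × (List (String × String)) :=
  (" hi ", some 200, [("a", "1"), ("Err1", "E"), ("IsSuccess", "0")])

def Spec_format_namecheap_message_py (body : String) (response_code : Option Int) (fields : List (String × String)) (out : String) : Prop := out = format_namecheap_message_py_alt body response_code fields
instance (body : String) (response_code : Option Int) (fields : List (String × String)) (out : String) : Decidable (Spec_format_namecheap_message_py body response_code fields out) := by unfold Spec_format_namecheap_message_py; infer_instance

-- ===== CLAIM (what is proved, stated in full; the proofs are below) =====
def Claim_equal_format_namecheap_message_py : Prop := ∀ (body : String) (response_code : Option Int) (fields : List (String × String)), Dom_format_namecheap_message_py body response_code fields → Pre_format_namecheap_message_py body response_code fields → Spec_format_namecheap_message_py body response_code fields (format_namecheap_message_py body response_code fields)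

-- ===== LEMMAS AND PROOFS =====

-- the rank B sorts by, as a case split on the key
lemma pvRank_cases (k : String) :
    pvPrio.getD k 3 =
      if k = "ErrCount" then 0 else if k = "IsSuccess" then 1 else if k = "Err1" then 2 else 3 := by
  by_cases h0 : k = "ErrCount"
  · simp [pvPrio, PySem.Dict.getD_eq_get?_getD, PySem.Dict.get?_mk_cons, h0]
  · by_cases h1 : k = "IsSuccess"
    · simp [pvPrio, PySem.Dict.getD_eq_get?_getD, PySem.Dict.get?_mk_cons, h0, h1]
    · by_cases h2 : k = "Err1"
      · simp [pvPrio, PySem.Dict.getD_eq_get?_getD, PySem.Dict.get?_mk_cons, h0, h1, h2]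
      · rw [if_neg h0, if_neg h1, if_neg h2]
        simp [pvPrio, PySem.Dict.getD_eq_get?_getD, PySem.Dict.get?_mk_cons, PySem.Dict.get?,
          beq_iff_eq, Ne.symm h0, Ne.symm h1, Ne.symm h2]

lemma pvInsertBy_middle {α : Type} (bef : α → α → Bool) (x : α) (A B : List α)
    (hA : ∀ a ∈ A, bef x a = false) (hB : ∀ b ∈ B, bef x b = true) :
    PySem.List.insertBy bef x (A ++ B) = A ++ x :: B := by
  induction A with
  | nil =>
    cases B with
    | nil => simp [PySem.List.insertBy]
    | cons b bs => simp [PySem.List.insertBy, hB b (by simp)]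
  | cons a as ih =>
    have ha : bef x a = false := hA a (by simp)
    have := ih (fun a h => hA a (List.mem_cons_of_mem _ h))
    simp [PySem.List.insertBy, ha, this]

-- stability: sorting by a rank in {0,1,2,3} is the concatenation of the four rank classes
lemma pvSorted_rank {α : Type} (key : α → Int) (l : List α) (hb : ∀ x, 0 ≤ key x ∧ key x ≤ 3) :
    PySem.List.sorted l key false =
      l.filter (fun p => key p == 0) ++ l.filter (fun p => key p == 1) ++
      l.filter (fun p => key p == 2) ++ l.filter (fun p => key p == 3) := by
  induction l using List.reverseRecOn with
  | nil => simp [PySem.List.sorted]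
  | append_singleton l x ih =>
    have hs : PySem.List.sorted (l ++ [x]) key false
        = PySem.List.insertBy (fun a b => decide (key a < key b)) x (PySem.List.sorted l key false) := by
      simp [PySem.List.sorted_eq_foldl_insertBy, List.foldl_append]
    rw [hs, ih]
    have hmem : ∀ (i : Int) (a : α), a ∈ l.filter (fun p => key p == i) → key a = i := by
      intro i a ha
      simpa [beq_iff_eq] using List.of_mem_filter ha
    have hlow : ∀ (i : Int), i ≤ key x →
        ∀ a ∈ l.filter (fun p => key p == i), (decide (key x < key a)) = false := by
      intro i hi a ha
      have := hmem i a ha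
      simp only [decide_eq_false_iff_not, not_lt, this]
      omega
    have hhigh : ∀ (i : Int), key x < i →
        ∀ b ∈ l.filter (fun p => key p == i), (decide (key x < key b)) = true := by
      intro i hi b hbm
      have := hmem i b hbm
      simp only [decide_eq_true_eq, this]
      omega
    have hfa : ∀ (i : Int), (l ++ [x]).filter (fun p => key p == i)
        = l.filter (fun p => key p == i) ++ (if key x = i then [x] else []) := by
      intro i
      by_cases h : key x = i <;>
        simp [List.filter_append, List.filter_cons, beq_iff_eq, h]
    have hxb := hb x
    rcases (show key x = 0 ∨ key x = 1 ∨ key x = 2 ∨ key x = 3 by omega) with h | h | h | h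
    · rw [List.append_assoc, List.append_assoc,
        pvInsertBy_middle _ x _ _ (hlow 0 (by omega))
          (by
            intro b hbm
            simp only [List.mem_append] at hbm
            rcases hbm with h1 | h2 | h3
            · exact hhigh 1 (by omega) _ h1
            · exact hhigh 2 (by omega) _ h2
            · exact hhigh 3 (by omega) _ h3)]
      simp only [hfa, h]
      norm_num
    · rw [List.append_assoc, List.append_assoc, ← List.append_assoc,
        pvInsertBy_middle _ x _ _
          (by
            intro a ham
            simp only [List.mem_append] at ham
            rcases ham with h0 | h1
            · exact hlow 0 (by omega) _ h0
            · exact hlow 1 (by omega) _ h1)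
          (by
            intro b hbm
            simp only [List.mem_append] at hbm
            rcases hbm with h2 | h3
            · exact hhigh 2 (by omega) _ h2
            · exact hhigh 3 (by omega) _ h3)]
      simp only [hfa, h]
      norm_num
    · rw [List.append_assoc, List.append_assoc, ← List.append_assoc, ← List.append_assoc,
        pvInsertBy_middle _ x _ _
          (by
            intro a ham
            simp only [List.mem_append] at ham
            rcases ham with (h0 | h1) | h2
            · exact hlow 0 (by omega) _ h0
            · exact hlow 1 (by omega) _ h1
            · exact hlow 2 (by omega) _ h2)
          (hhigh 3 (by omega))]
      simp only [hfa, h]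
      norm_num
    · have e := pvInsertBy_middle (fun a b => decide (key a < key b)) x
          (List.filter (fun p => key p == (0:Int)) l ++ List.filter (fun p => key p == (1:Int)) l ++
            List.filter (fun p => key p == (2:Int)) l ++ List.filter (fun p => key p == (3:Int)) l) []
          (by
            intro a ham
            simp only [List.mem_append] at ham
            rcases ham with ((h0 | h1) | h2) | h3
            · exact hlow 0 (by omega) _ h0
            · exact hlow 1 (by omega) _ h1
            · exact hlow 2 (by omega) _ h2
            · exact hlow 3 (by omega) _ h3)
          (by intro b hbm; simp at hbm)
      rw [List.append_nil] at e
      rw [e]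
      simp only [hfa, h]
      norm_num

lemma pvFilter_key_eq_get? (l : List (String × String)) (hnd : (l.map Prod.fst).Nodup) (k : String) :
    l.filter (fun p => p.1 == k) =
      match (PySem.Dict.mk l).get? k with
      | some v => [(k, v)]
      | none => [] := by
  induction l with
  | nil => simp [PySem.Dict.get?]
  | cons a t ih =>
    obtain ⟨ak, av⟩ := a
    simp only [List.map_cons, List.nodup_cons] at hnd
    by_cases h : ak = k
    · subst h
      have ht : t.filter (fun p => p.1 == ak) = [] := by
        refine List.filter_eq_nil_iff.mpr ?_
        intro p hp hk
        have hm : p.1 ∈ t.map Prod.fst := List.mem_map_of_mem hp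
        rw [beq_iff_eq.mp hk] at hm
        exact hnd.1 hm
      simp [List.filter_cons, PySem.Dict.get?_mk_cons, ht]
    · have hne : (ak == k) = false := by simp [h]
      simp [List.filter_cons, PySem.Dict.get?_mk_cons, hne, ih hnd.2]

-- rank classes, named by their key
lemma pvFilter_rank0 (fields : List (String × String)) :
    fields.filter (fun p => pvPrio.getD p.1 3 == 0) = fields.filter (fun p => p.1 == "ErrCount") := by
  refine List.filter_congr ?_
  intro p _
  rw [pvRank_cases]
  split_ifs <;> simp_all

lemma pvFilter_rank1 (fields : List (String × String)) :
    fields.filter (fun p => pvPrio.getD p.1 3 == 1) = fields.filter (fun p => p.1 == "IsSuccess") := by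
  refine List.filter_congr ?_
  intro p _
  rw [pvRank_cases]
  split_ifs <;> simp_all

lemma pvFilter_rank2 (fields : List (String × String)) :
    fields.filter (fun p => pvPrio.getD p.1 3 == 2) = fields.filter (fun p => p.1 == "Err1") := by
  refine List.filter_congr ?_
  intro p _
  rw [pvRank_cases]
  split_ifs <;> simp_all

lemma pvFilter_rank3 (fields : List (String × String)) :
    fields.filter (fun p => pvPrio.getD p.1 3 == 3) =
      fields.filter (fun kv => !(kv.1 == "ErrCount" || kv.1 == "IsSuccess" || kv.1 == "Err1")) := by
  refine List.filter_congr ?_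
  intro p _
  rw [pvRank_cases]
  split_ifs <;> simp_all

-- A's two passes build exactly B's single sorted-and-formatted pass
lemma pvOrdered_eq (fields : List (String × String)) (hnd : (fields.map Prod.fst).Nodup) :
    fields.foldl (fun acc kv =>
        if kv.1 == "ErrCount" || kv.1 == "IsSuccess" || kv.1 == "Err1" then acc
        else acc ++ [kv.1 ++ "=" ++ kv.2])
      ((["ErrCount", "IsSuccess", "Err1"] : List String).foldl (fun acc key =>
        match (PySem.Dict.mk fields).get? key with
        | some v => acc ++ [key ++ "=" ++ v]
        | none => acc) [])
    = (PySem.List.sorted fields (fun kv => pvPrio.getD kv.1 3) false).map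
        (fun kv => kv.1 ++ "=" ++ kv.2) := by
  have hb : ∀ kv : String × String, 0 ≤ pvPrio.getD kv.1 3 ∧ pvPrio.getD kv.1 3 ≤ 3 := by
    intro kv
    rw [pvRank_cases]
    split_ifs <;> omega
  rw [pvSorted_rank _ fields hb]
  have hfun : (fun (acc : List String) (kv : String × String) =>
      if kv.1 == "ErrCount" || kv.1 == "IsSuccess" || kv.1 == "Err1" then acc
      else acc ++ [kv.1 ++ "=" ++ kv.2])
    = (fun acc kv => if (!(kv.1 == "ErrCount" || kv.1 == "IsSuccess" || kv.1 == "Err1")) then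
        acc ++ [kv.1 ++ "=" ++ kv.2] else acc) := by
    funext acc kv
    cases hc : (kv.1 == "ErrCount" || kv.1 == "IsSuccess" || kv.1 == "Err1") <;> simp [hc]
  rw [hfun, PySem.List.foldl_append_if]
  rw [List.map_append, List.map_append, List.map_append,
    pvFilter_rank0, pvFilter_rank1, pvFilter_rank2, pvFilter_rank3,
    pvFilter_key_eq_get? fields hnd "ErrCount",
    pvFilter_key_eq_get? fields hnd "IsSuccess",
    pvFilter_key_eq_get? fields hnd "Err1"]
  rcases hE : (PySem.Dict.mk fields).get? "ErrCount" with _ | v0 <;>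
    rcases hS : (PySem.Dict.mk fields).get? "IsSuccess" with _ | v1 <;>
      rcases hR : (PySem.Dict.mk fields).get? "Err1" with _ | v2 <;>
        simp [List.foldl_cons, List.foldl_nil, hE, hS, hR, List.append_assoc]

-- ===== VERDICT (by name: the statement is the Claim_ definition above) =====
theorem format_namecheap_message_py_spec : Claim_equal_format_namecheap_message_py := by
  intro body rc fields _ hpre
  unfold Pre_format_namecheap_message_py at hpre
  unfold Spec_format_namecheap_message_py
  unfold format_namecheap_message_py format_namecheap_message_py_alt
  by_cases hf : fields = []
  · simp [hf]
  · simp only [if_neg hf, pvOrdered_eq fields hpre]
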